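-- pv_equiv track=rewrite | github.com/AiMiDi/C4D_MMD_Tool | sdk_r21/frameworks/settings/sourceprocessor/htmlgen.py | fixLinks
-- ===== SOURCE A (Python) =====
-- def fixLinks(baseId, html):
--     if baseId:
--         baseId += '/'
--     result = []
--     start = 0
--     while True:
--         fix = html.find('"\rlLINK', start)
--         if fix < 0:
--             result.append(html[start:])
--             break
--         end = html.index('"', fix + 7)
--         pathEnd = html.rfind('/', fix, end)
--         if pathEnd >= 0:
--             pathEnd += 1
--         else:
--             pathEnd = fix+7
--         path = html[fix+7:pathEnd]
--         b = 0
--         while True: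
--             b2 = baseId.find('/', b)
--             p2 = path.find('/')
--             if b2 >= 0 and p2 >= 0 and baseId[b:b2] == path[:p2]:
--                 b = b2 + 1
--                 path = path[p2+1:]
--             else:
--                 break
--         while True:
--             b2 = baseId.find('/', b)
--             if b2 >= 0:
--                 b = b2 + 1
--                 path = '../' + path
--             else:
--                 break
--         result.append(html[start:fix+1])
--         result.append(path)
--         start = pathEnd
--     return ''.join(result)
-- ===== SOURCE B (Python) =====
-- def fixLinks(baseId, html):
--     base = baseId.split('/') if baseId else []
--     parts = html.split('"\rlLINK')
--     out = [parts[0]]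
--     for part in parts[1:]:
--         end = part.find('"')
--         if end < 0:
--             # the closing quote was consumed as the first char of the next marker
--             end = len(part)
--         slash = part.rfind('/', 0, end)
--         segs = part[:slash + 1].split('/')
--         i = 0
--         while i < len(base) and i < len(segs) - 1 and base[i] == segs[i]:
--             i += 1
--         out.append('"' + '../' * (len(base) - i) + '/'.join(segs[i:]) + part[slash + 1:])
--     return ''.join(out)
-- ===== Notes on version B (the rewrite author's own statement) =====
-- stated objective: idiomatic
-- what changed: A's outer marker-scanning while-loop with manual find/index/rfind bookkeeping is replaced by one html.split on the marker string with a per-part rewrite, and A's two character-index inner while-loops over baseId and the path are replaced by splitting on '/' and counting the common leading-segment prefix.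
import Mathlib
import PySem

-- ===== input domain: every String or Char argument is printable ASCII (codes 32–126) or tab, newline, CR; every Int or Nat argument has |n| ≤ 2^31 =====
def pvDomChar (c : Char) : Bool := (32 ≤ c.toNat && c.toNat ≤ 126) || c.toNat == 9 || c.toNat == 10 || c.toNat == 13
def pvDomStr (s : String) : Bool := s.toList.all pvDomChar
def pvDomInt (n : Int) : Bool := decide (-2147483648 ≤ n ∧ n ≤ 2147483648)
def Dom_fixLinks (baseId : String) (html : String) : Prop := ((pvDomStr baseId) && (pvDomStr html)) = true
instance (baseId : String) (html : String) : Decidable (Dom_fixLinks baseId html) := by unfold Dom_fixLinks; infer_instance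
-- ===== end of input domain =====

-- B replaces A's marker-scanning outer while-loop by one html.split on the
-- marker with a per-part rewrite, and A's two character-index inner while-loops
-- by split-on-'/' segment lists (objective: idiomatic; same overall cost).

-- ===== PORT A =====

def pvMarker : List Char := ['"', '\r', 'l', 'L', 'I', 'N', 'K']

-- spec facts about findFrom/rfind used for the ports' termination
theorem pvFindFrom_pos_spec (s sub : List Char) (b : Nat) (h : 0 ≤ PySem.Chars.findFrom s sub (b : Int)) :
    b ≤ s.length ∧ (b : Int) ≤ PySem.Chars.findFrom s sub (b : Int) ∧
      (PySem.Chars.findFrom s sub (b : Int)).toNat + sub.length ≤ s.length ∧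
      sub <+: s.drop (PySem.Chars.findFrom s sub (b : Int)).toNat := by
  by_cases hb : b ≤ s.length
  · rw [PySem.Chars.findFrom_natCast s sub b hb] at h ⊢
    by_cases hf : PySem.Chars.find (s.drop b) sub = -1
    · simp [hf] at h
    · simp only [hf, if_false]
      have hge : 0 ≤ PySem.Chars.find (s.drop b) sub := by
        have := PySem.Chars.neg_one_le_find (s.drop b) sub
        omega
      have hsp := PySem.Chars.find_spec (s := s.drop b) (sub := sub) hge
      have hpre := hsp.1
      have hlen := hpre.length_le
      rw [List.drop_drop] at hpre
      rw [List.length_drop, List.length_drop] at hlen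
      have hfl := PySem.Chars.find_le_length (List.drop b s) sub
      rw [List.length_drop] at hfl
      have htn : ((b : Int) + PySem.Chars.find (s.drop b) sub).toNat
          = b + (PySem.Chars.find (s.drop b) sub).toNat := by omega
      rw [htn]
      refine ⟨hb, ?g2, ?g3, hpre⟩
      case g2 => exact le_add_of_nonneg_right hge
      case g3 => omega
  · exfalso
    have : PySem.Chars.findFrom s sub (b : Int) = -1 := by
      unfold PySem.Chars.findFrom
      have h1 : ¬ ((b : Int) < 0) := by omega
      have h2 : ((s.length : Int) < (b : Int)) := by omega
      simp [h1, h2]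
    omega

theorem pvRfind_go_ge (s sub : List Char) (k : Nat) : -1 ≤ PySem.Chars.rfind.go s sub k := by
  induction k with
  | zero => unfold PySem.Chars.rfind.go; split <;> omega
  | succ j ih => unfold PySem.Chars.rfind.go; split; · omega
                 · exact ih

theorem pvRfind_pos (l sub : List Char) (h : PySem.Chars.rfind l sub ≠ -1) :
    0 ≤ PySem.Chars.rfind l sub := by
  have := pvRfind_go_ge l sub l.length
  unfold PySem.Chars.rfind at h ⊢
  omega

theorem pvRfindFrom_pos_spec (s sub : List Char) (f : Nat) (e : Int)
    (h : 0 ≤ PySem.Chars.rfindFrom s sub (f : Int) (some e)) :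
    (f : Int) ≤ PySem.Chars.rfindFrom s sub (f : Int) (some e) := by
  unfold PySem.Chars.rfindFrom at h ⊢
  have h1 : ¬ ((f : Int) < 0) := by omega
  simp only [h1, if_false] at h ⊢
  revert h
  split_ifs with c1 c2 c3 c4 c5 c6 c7 c8 c9 c10 c11 <;> intro h <;>
    first
      | omega
      | (have := pvRfind_pos _ sub (by assumption); omega)

theorem pvLoop1A_dec (path : List Char) (hp : 0 ≤ PySem.Chars.find path ['/']) :
    (PySem.Chars.slice path (some (PySem.Chars.find path ['/'] + 1)) none).length < path.length := by
  have hsp := PySem.Chars.find_spec (s := path) (sub := ['/']) hp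
  have hlen : (PySem.Chars.find path ['/']).toNat < path.length := by
    have := hsp.1.length_le
    simp at this
    omega
  rw [PySem.Chars.slice_eq_listSlice,
    PySem.List.slice_from path (by omega : (0:Int) ≤ PySem.Chars.find path ['/'] + 1)]
  rw [List.length_drop]
  omega

theorem pvLoop2A_dec (baseId' : List Char) (b : Nat)
    (h : 0 ≤ PySem.Chars.findFrom baseId' ['/'] (b : Int)) :
    baseId'.length + 1 - ((PySem.Chars.findFrom baseId' ['/'] (b : Int)).toNat + 1) <
      baseId'.length + 1 - b := by
  have hs := pvFindFrom_pos_spec baseId' ['/'] b h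
  have h1 : (['/'] : List Char).length = 1 := rfl
  rw [h1] at hs
  omega

theorem pvPathEnd_gt (html : List Char) (start : Nat)
    (hf : ¬ PySem.Chars.findFrom html pvMarker (start : Int) < 0) :
    start ≤ html.length ∧
    start <
      (if 0 ≤ PySem.Chars.rfindFrom html ['/'] (((PySem.Chars.findFrom html pvMarker (start : Int)).toNat : Int))
            (some (PySem.Chars.findFrom html ['"'] (((PySem.Chars.findFrom html pvMarker (start : Int)).toNat : Int) + 7))) then
        (PySem.Chars.rfindFrom html ['/'] (((PySem.Chars.findFrom html pvMarker (start : Int)).toNat : Int))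
            (some (PySem.Chars.findFrom html ['"'] (((PySem.Chars.findFrom html pvMarker (start : Int)).toNat : Int) + 7)))).toNat + 1
      else (PySem.Chars.findFrom html pvMarker (start : Int)).toNat + 7) := by
  have hs := pvFindFrom_pos_spec html pvMarker start (by omega)
  have h7 : pvMarker.length = 7 := rfl
  rw [h7] at hs
  refine ⟨hs.1, ?_⟩
  split_ifs with hpe
  · have hr := pvRfindFrom_pos_spec html ['/'] (PySem.Chars.findFrom html pvMarker (start : Int)).toNat _ hpe
    omega
  · omega

theorem pvLoopOuter_dec (html : List Char) (start : Nat)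
    (hf : ¬ PySem.Chars.findFrom html pvMarker (start : Int) < 0) :
    html.length + 1 -
      (if 0 ≤ PySem.Chars.rfindFrom html ['/'] (((PySem.Chars.findFrom html pvMarker (start : Int)).toNat : Int))
            (some (PySem.Chars.findFrom html ['"'] (((PySem.Chars.findFrom html pvMarker (start : Int)).toNat : Int) + 7))) then
        (PySem.Chars.rfindFrom html ['/'] (((PySem.Chars.findFrom html pvMarker (start : Int)).toNat : Int))
            (some (PySem.Chars.findFrom html ['"'] (((PySem.Chars.findFrom html pvMarker (start : Int)).toNat : Int) + 7)))).toNat + 1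
      else (PySem.Chars.findFrom html pvMarker (start : Int)).toNat + 7) <
      html.length + 1 - start := by
  have := pvPathEnd_gt html start hf
  omega

-- inner `while` loop 1 of A: consume equal leading segments of baseId and path
def pvLoop1A (baseId' : List Char) (b : Nat) (path : List Char) : Nat × List Char :=
  let b2 := PySem.Chars.findFrom baseId' ['/'] (b : Int)
  let p2 := PySem.Chars.find path ['/']
  if h : 0 ≤ b2 ∧ 0 ≤ p2 ∧
      PySem.Chars.slice baseId' (some (b : Int)) (some b2) = PySem.Chars.slice path none (some p2) then
    pvLoop1A baseId' (b2.toNat + 1) (PySem.Chars.slice path (some (p2 + 1)) none)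
  else (b, path)
termination_by path.length
decreasing_by
  exact pvLoop1A_dec path h.2.1

-- inner `while` loop 2 of A: '../' per remaining baseId segment
def pvLoop2A (baseId' : List Char) (b : Nat) (path : List Char) : List Char :=
  let b2 := PySem.Chars.findFrom baseId' ['/'] (b : Int)
  if h : 0 ≤ b2 then
    pvLoop2A baseId' (b2.toNat + 1) ('.' :: '.' :: '/' :: path)
  else path
termination_by baseId'.length + 1 - b
decreasing_by
  exact pvLoop2A_dec baseId' b h

-- outer `while` loop of A over the html string
def pvLoopA (baseId' html : List Char) (acc : List (List Char)) (start : Nat) : List Char :=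
  let fix := PySem.Chars.findFrom html pvMarker (start : Int)
  if hf : fix < 0 then
    PySem.Chars.join [] (acc ++ [PySem.Chars.slice html (some (start : Int)) none])
  else
    let fixN := fix.toNat
    let endI := PySem.Chars.findFrom html ['"'] ((fixN : Int) + 7)
    if he : 0 ≤ endI then
      let pe := PySem.Chars.rfindFrom html ['/'] (fixN : Int) (some endI)
      let pathEnd := if 0 ≤ pe then pe.toNat + 1 else fixN + 7
      let path := PySem.Chars.slice html (some ((fixN : Int) + 7)) (some (pathEnd : Int))
      let path' := pvLoop2A baseId' (pvLoop1A baseId' 0 path).1 (pvLoop1A baseId' 0 path).2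
      pvLoopA baseId' html
        (acc ++ [PySem.Chars.slice html (some (start : Int)) (some ((fixN : Int) + 1)), path']) pathEnd
    else
      -- Python raises ValueError here (no closing '"'); excluded by Pre_
      PySem.Chars.join [] acc
termination_by html.length + 1 - start
decreasing_by
  exact pvLoopOuter_dec html start hf

def fixLinks (baseId : String) (html : String) : String :=
  let b := baseId.toList
  let baseId' := if b ≠ [] then b ++ ['/'] else b
  String.ofList (pvLoopA baseId' html.toList [] 0)

-- ===== PORT B =====

-- the `i` while-loop of B: length of the common leading-segment prefix
-- (guarded so the last entry of `segs` never matches)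
def pvCommonLen : List (List Char) → List (List Char) → Nat
  | b :: bs, s1 :: s2 :: ss => if b = s1 then pvCommonLen bs (s2 :: ss) + 1 else 0
  | _, _ => 0

-- the loop body of B: rewrite one part produced by html.split('"\rlLINK')
-- (part[:slash+1] / part[slash+1:] have a nonnegative bound, so take/drop are exact)
def pvPartB (base : List (List Char)) (part : List Char) : List Char :=
  let e0 := PySem.Chars.find part ['"']
  let e : Int := if e0 < 0 then (part.length : Int) else e0
  let slash := PySem.Chars.rfindFrom part ['/'] 0 (some e)
  let segs := List.splitOn '/' (part.take (slash + 1).toNat)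
  let i := pvCommonLen base segs
  '"' :: ((List.replicate (base.length - i) ['.', '.', '/']).flatten ++
    ['/'].intercalate (segs.drop i) ++ part.drop (slash + 1).toNat)

def fixLinks_alt (baseId : String) (html : String) : String :=
  let b := baseId.toList
  let base := if b = [] then [] else List.splitOn '/' b
  match PySem.Chars.splitOn html.toList pvMarker with
  | [] => ""  -- unreachable: str.split never returns an empty list
  | first :: rest => String.ofList (PySem.Chars.join [] (first :: rest.map (pvPartB base)))

-- ===== PRECONDITION & SPEC =====
-- Pre_ excludes exactly the inputs where Python raises ValueError: a '"\rlLINK'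
-- marker with no closing '"' after it (then html.index('"', fix+7) raises).
def Pre_fixLinks (baseId : String) (html : String) : Prop :=
  ∀ k < html.toList.length, pvMarker <+: html.toList.drop k → ('"' : Char) ∈ html.toList.drop (k + 7)
instance (baseId : String) (html : String) : Decidable (Pre_fixLinks baseId html) := by
  unfold Pre_fixLinks; infer_instance

def pvWitness_fixLinks : String × String := ("a", "\"\rlLINKb/c\"")

def Spec_fixLinks (baseId : String) (html : String) (out : String) : Prop := out = fixLinks_alt baseId html
instance (baseId : String) (html : String) (out : String) : Decidable (Spec_fixLinks baseId html out) := by unfold Spec_fixLinks; infer_instance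

-- ===== CLAIM (what is proved, stated in full; the proofs are below) =====
def Claim_equal_fixLinks : Prop := ∀ (baseId : String) (html : String), Dom_fixLinks baseId html → Pre_fixLinks baseId html → Spec_fixLinks baseId html (fixLinks baseId html)

-- ===== LEMMAS AND PROOFS =====

theorem pvFind_not_mem (c : Char) (s : List Char) (h : c ∉ s) : PySem.Chars.find s [c] = -1 := by
  rw [PySem.Chars.find_eq_neg_one_iff, List.singleton_infix_iff]; exact h

theorem pvFind_first (c : Char) (a t : List Char) (h : c ∉ a) :
    PySem.Chars.find (a ++ c :: t) [c] = (a.length : Int) := by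
  have hnn : 0 ≤ PySem.Chars.find (a ++ c :: t) [c] := by
    rw [PySem.Chars.find_nonneg_iff, List.singleton_infix_iff]; simp
  obtain ⟨hpre, hmin⟩ := PySem.Chars.find_spec hnn
  have hle : (PySem.Chars.find (a ++ c :: t) [c]).toNat ≤ a.length := by
    by_contra hgt
    exact hmin a.length (by omega) (by rw [List.drop_left]; simp)
  rcases Nat.lt_or_ge (PySem.Chars.find (a ++ c :: t) [c]).toNat a.length with hlt | hge
  · exfalso
    set f := (PySem.Chars.find (a ++ c :: t) [c]).toNat with hf
    have hp2 : [c] <+: List.drop f a ++ c :: t := by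
      rw [List.drop_append_of_le_length (by omega)] at hpre; exact hpre
    have hhead : (List.drop f a ++ c :: t).head? = some c := by
      rcases hp2 with ⟨r, hr⟩
      cases hd : List.drop f a ++ c :: t with
      | nil => simp [hd] at hr
      | cons y ys => rw [hd] at hr; simp at hr; simp [hr.1]
    have hne : List.drop f a ≠ [] := by
      intro hnil; rw [List.drop_eq_nil_iff] at hnil; omega
    obtain ⟨y, ys, hys⟩ := List.exists_cons_of_ne_nil hne
    rw [hys] at hhead; simp at hhead
    have hym : y ∈ a := by
      have : y ∈ List.drop f a := by rw [hys]; simp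
      exact List.mem_of_mem_drop this
    exact h (hhead ▸ hym)
  · omega

theorem pvFirst_decomp (c : Char) (s : List Char) (h : c ∈ s) :
    ∃ a t, s = a ++ c :: t ∧ c ∉ a := by
  induction s with
  | nil => cases h
  | cons x xs ih =>
    by_cases hx : x = c
    · exact ⟨[], xs, by simp [hx], by simp⟩
    · rcases ih (by rcases List.mem_cons.mp h with h1 | h1; exacts [absurd h1.symm hx, h1]) with ⟨a, t, hs, hna⟩
      exact ⟨x :: a, t, by simp [hs], by simp only [List.mem_cons, not_or]; exact ⟨fun hh => hx hh.symm, hna⟩⟩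

theorem pvSplitOn_not_mem (c : Char) (s : List Char) (h : c ∉ s) : List.splitOn c s = [s] := by
  induction s with
  | nil => rfl
  | cons x xs ih =>
    have hx : ¬ (x == c) = true := by
      simp only [beq_iff_eq]; intro he; exact h (he ▸ List.mem_cons_self)
    simp only [List.splitOn, List.splitOnP_cons] at *
    simp only [hx, if_false]
    rw [ih (fun hm => h (List.mem_cons_of_mem x hm))]
    rfl

theorem pvSplitOn_first (c : Char) (a t : List Char) (h : c ∉ a) :
    List.splitOn c (a ++ c :: t) = a :: List.splitOn c t := by
  induction a with
  | nil => simp [List.splitOn, List.splitOnP_cons]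
  | cons x xs ih =>
    have hx : ¬ (x == c) = true := by
      simp only [beq_iff_eq]; intro he; exact h (he ▸ List.mem_cons_self)
    rw [List.cons_append]
    simp only [List.splitOn, List.splitOnP_cons] at *
    simp only [hx, if_false]
    rw [ih (fun hm => h (List.mem_cons_of_mem x hm))]
    rfl

theorem pvSplitOn_seg_not_mem (c : Char) (s : List Char) :
    ∀ seg ∈ List.splitOn c s, c ∉ seg := by
  induction hn : s.length using Nat.strong_induction_on generalizing s with
  | _ n ih =>
    by_cases hc : c ∈ s
    · obtain ⟨a, t, rfl, hna⟩ := pvFirst_decomp c s hc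
      rw [pvSplitOn_first c a t hna]
      intro seg hseg
      rcases List.mem_cons.mp hseg with h | h
      · subst h; exact hna
      · exact ih t.length (by rw [← hn]; simp; omega) t rfl seg h
    · rw [pvSplitOn_not_mem c s hc]; intro seg hseg; simp at hseg; subst hseg; exact hc

def pvRep (bs : List (List Char)) : List Char := bs.flatMap (fun s => s ++ ['/'])

theorem pvRep_cons (s : List Char) (bs : List (List Char)) :
    pvRep (s :: bs) = s ++ '/' :: pvRep bs := by
  simp [pvRep]

theorem pvRep_splitOn (s : List Char) : s ++ ['/'] = pvRep (List.splitOn '/' s) := by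
  induction hn : s.length using Nat.strong_induction_on generalizing s with
  | _ n ih =>
    by_cases hc : ('/' : Char) ∈ s
    · obtain ⟨a, t, rfl, hna⟩ := pvFirst_decomp '/' s hc
      rw [pvSplitOn_first '/' a t hna, pvRep_cons, ← ih t.length (by rw [← hn]; simp; omega) t rfl]
      simp
    · rw [pvSplitOn_not_mem '/' s hc, pvRep]; simp

def pvPad (k : Nat) : List Char := (List.replicate k ['.', '.', '/']).flatten

theorem pvPad_snoc (k : Nat) : pvPad (k + 1) = pvPad k ++ ['.', '.', '/'] := by
  simp [pvPad, List.replicate_succ']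

theorem pvJoin_nil (ps : List (List Char)) : PySem.Chars.join [] ps = ps.flatten := by
  rw [PySem.Chars.join]
  induction ps with
  | nil => rfl
  | cons a t ih =>
    cases t with
    | nil => simp [List.intercalate]
    | cons b u => simp_all [List.intercalate, List.intersperse]

theorem pvLoop2A_rep (bs : List (List Char)) : ∀ (baseId' : List Char) (b : Nat) (path : List Char),
    b ≤ baseId'.length → baseId'.drop b = pvRep bs → (∀ s ∈ bs, ('/' : Char) ∉ s) →
    pvLoop2A baseId' b path = pvPad bs.length ++ path := by
  induction bs with
  | nil =>
    intro baseId' b path hb hd _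
    have hff : PySem.Chars.findFrom baseId' ['/'] (b : Int) = -1 := by
      rw [PySem.Chars.findFrom_natCast baseId' ['/'] b hb, hd]
      rw [show pvRep ([] : List (List Char)) = [] from rfl]
      rw [pvFind_not_mem '/' [] (by simp)]
      simp
    rw [pvLoop2A]
    rw [dif_neg (by rw [hff]; omega)]
    simp [pvPad]
  | cons s bs ih =>
    intro baseId' b path hb hd hfree
    have hdd : baseId'.drop b = s ++ '/' :: pvRep bs := by rw [hd, pvRep_cons]
    have hfs : PySem.Chars.find (baseId'.drop b) ['/'] = (s.length : Int) := by
      rw [hdd]; exact pvFind_first '/' s (pvRep bs) (hfree s (by simp))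
    have hff : PySem.Chars.findFrom baseId' ['/'] (b : Int) = ((b + s.length : Nat) : Int) := by
      rw [PySem.Chars.findFrom_natCast baseId' ['/'] b hb, hfs]
      rw [if_neg (by omega)]
      push_cast; ring
    have hlen : baseId'.length - b = s.length + 1 + (pvRep bs).length := by
      have h1 := congrArg List.length hdd
      simp at h1
      omega
    have hb' : b + s.length + 1 ≤ baseId'.length := by omega
    have hd' : baseId'.drop (b + s.length + 1) = pvRep bs := by
      have h2 : baseId'.drop (b + s.length + 1) = (baseId'.drop b).drop (s.length + 1) := by
        rw [List.drop_drop]; ring_nf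
      rw [h2, hdd]
      rw [show (s ++ '/' :: pvRep bs) = (s ++ ['/']) ++ pvRep bs by simp]
      have h3 : List.drop (s ++ ['/']).length ((s ++ ['/']) ++ pvRep bs) = pvRep bs :=
        List.drop_left
      simpa using h3
    rw [pvLoop2A]
    rw [dif_pos (by rw [hff]; omega)]
    have htn : (PySem.Chars.findFrom baseId' ['/'] (b : Int)).toNat + 1 = b + s.length + 1 := by
      rw [hff]; omega
    rw [htn, ih baseId' (b + s.length + 1) _ hb' hd' (fun x hx => hfree x (by simp [hx]))]
    rw [List.length_cons, pvPad_snoc]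
    simp

theorem pvSplitOn_ne_nil (c : Char) (t : List Char) : List.splitOn c t ≠ [] := by
  simp only [List.splitOn]; exact List.splitOnP_ne_nil _ _

theorem pvDrop_sep_left (a t : List Char) (c : Char) : List.drop (a.length + 1) (a ++ c :: t) = t := by
  rw [show (a ++ c :: t) = (a ++ [c]) ++ t by simp]
  have h3 : List.drop (a ++ [c]).length ((a ++ [c]) ++ t) = t := List.drop_left
  simpa using h3

theorem pvInner_eq (bs : List (List Char)) : ∀ (baseId' : List Char) (b : Nat) (path : List Char),
    b ≤ baseId'.length → baseId'.drop b = pvRep bs → (∀ s ∈ bs, ('/' : Char) ∉ s) →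
    pvLoop2A baseId' (pvLoop1A baseId' b path).1 (pvLoop1A baseId' b path).2 =
      pvPad (bs.length - pvCommonLen bs (List.splitOn '/' path)) ++
        ['/'].intercalate ((List.splitOn '/' path).drop (pvCommonLen bs (List.splitOn '/' path))) := by
  induction bs with
  | nil =>
    intro baseId' b path hb hd _
    have hff : PySem.Chars.findFrom baseId' ['/'] (b : Int) = -1 := by
      rw [PySem.Chars.findFrom_natCast baseId' ['/'] b hb, hd]
      rw [show pvRep ([] : List (List Char)) = [] from rfl]
      rw [pvFind_not_mem '/' [] (by simp)]
      simp
    rw [pvLoop1A]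
    rw [dif_neg (by rw [hff]; intro hcon; omega)]
    dsimp only
    rw [pvLoop2A_rep [] baseId' b path hb hd (by simp)]
    rw [show pvCommonLen [] (List.splitOn '/' path) = 0 from rfl]
    simp [pvPad, List.intercalate_splitOn]
  | cons s bs ih =>
    intro baseId' b path hb hd hfree
    have hdd : baseId'.drop b = s ++ '/' :: pvRep bs := by rw [hd, pvRep_cons]
    have hfs : PySem.Chars.find (baseId'.drop b) ['/'] = (s.length : Int) := by
      rw [hdd]; exact pvFind_first '/' s (pvRep bs) (hfree s (by simp))
    have hff : PySem.Chars.findFrom baseId' ['/'] (b : Int) = ((b + s.length : Nat) : Int) := by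
      rw [PySem.Chars.findFrom_natCast baseId' ['/'] b hb, hfs]
      rw [if_neg (by omega)]
      push_cast; ring
    have hlen : baseId'.length - b = s.length + 1 + (pvRep bs).length := by
      have h1 := congrArg List.length hdd
      simp at h1
      omega
    have hb' : b + s.length + 1 ≤ baseId'.length := by omega
    have hd' : baseId'.drop (b + s.length + 1) = pvRep bs := by
      have h2 : baseId'.drop (b + s.length + 1) = (baseId'.drop b).drop (s.length + 1) := by
        rw [List.drop_drop]; ring_nf
      rw [h2, hdd, pvDrop_sep_left]
    have hfree' : ∀ x ∈ bs, ('/' : Char) ∉ x := fun x hx => hfree x (by simp [hx])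
    have hsliceB : PySem.Chars.slice baseId' (some (b : Int)) (some (PySem.Chars.findFrom baseId' ['/'] (b : Int))) = s := by
      rw [hff, PySem.Chars.slice_eq_listSlice]
      rw [show ((b + s.length : Nat) : Int) = ((b : Nat) : Int) + ((s.length : Nat) : Int) by push_cast; ring]
      rw [PySem.List.slice_natCast_add, hdd]
      rw [show (s ++ '/' :: pvRep bs) = s ++ ('/' :: pvRep bs) from rfl]
      exact List.take_left
    by_cases hc : ('/' : Char) ∈ path
    · obtain ⟨a, t, rfl, hna⟩ := pvFirst_decomp '/' path hc
      have hp2 : PySem.Chars.find (a ++ '/' :: t) ['/'] = (a.length : Int) :=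
        pvFind_first '/' a t hna
      have hsliceP : PySem.Chars.slice (a ++ '/' :: t) none (some (PySem.Chars.find (a ++ '/' :: t) ['/'])) = a := by
        rw [hp2, PySem.Chars.slice_eq_listSlice, PySem.List.slice_to (a ++ '/' :: t) (by omega)]
        rw [show ((a.length : Nat) : Int).toNat = a.length by omega]
        exact List.take_left
      have hsliceT : PySem.Chars.slice (a ++ '/' :: t) (some (PySem.Chars.find (a ++ '/' :: t) ['/'] + 1)) none = t := by
        rw [hp2, PySem.Chars.slice_eq_listSlice, PySem.List.slice_from (a ++ '/' :: t) (by omega : (0:Int) ≤ (a.length : Int) + 1)]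
        rw [show ((a.length : Int) + 1).toNat = a.length + 1 by omega]
        exact pvDrop_sep_left a t '/'
      rw [pvSplitOn_first '/' a t hna]
      rcases hsp : List.splitOn '/' t with _ | ⟨g, gs⟩
      · exact absurd hsp (pvSplitOn_ne_nil '/' t)
      by_cases hsa : s = a
      · rw [pvLoop1A]
        rw [dif_pos ⟨by rw [hff]; omega, by rw [hp2]; omega, by rw [hsliceB, hsliceP]; exact hsa⟩]
        have htn : (PySem.Chars.findFrom baseId' ['/'] (b : Int)).toNat + 1 = b + s.length + 1 := by
          rw [hff]; omega
        rw [htn, hsliceT]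
        rw [ih baseId' (b + s.length + 1) t hb' hd' hfree']
        rw [hsp]
        rw [show pvCommonLen (s :: bs) (a :: g :: gs) = pvCommonLen bs (g :: gs) + 1 by
          simp [pvCommonLen, hsa]]
        simp only [List.length_cons, List.drop_succ_cons]
        congr 1
        congr 1
        omega
      · rw [pvLoop1A]
        rw [dif_neg (by
          intro hcon
          exact hsa (by rw [hsliceB, hsliceP] at hcon; exact hcon.2.2))]
        dsimp only
        rw [pvLoop2A_rep (s :: bs) baseId' b (a ++ '/' :: t) hb hd hfree]
        rw [show pvCommonLen (s :: bs) (a :: g :: gs) = 0 by simp [pvCommonLen, hsa]]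
        rw [show ((a :: g :: gs).drop 0) = a :: g :: gs from rfl]
        rw [← hsp, ← pvSplitOn_first '/' a t hna, List.intercalate_splitOn]
        simp
    · have hp2 : PySem.Chars.find path ['/'] = -1 := pvFind_not_mem '/' path hc
      rw [pvLoop1A]
      rw [dif_neg (by rw [hp2]; intro hcon; have := hcon.2.1; omega)]
      dsimp only
      rw [pvLoop2A_rep (s :: bs) baseId' b path hb hd hfree]
      rw [pvSplitOn_not_mem '/' path hc]
      rw [show pvCommonLen (s :: bs) [path] = 0 from rfl]
      simp [List.intercalate]

theorem pvLoopA_acc (baseId' html : List Char) : ∀ (fuel start : Nat) (acc : List (List Char)),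
    html.length + 1 - start ≤ fuel →
    pvLoopA baseId' html acc start = acc.flatten ++ pvLoopA baseId' html [] start := by
  intro fuel
  induction fuel with
  | zero =>
    intro start acc h
    have hf : PySem.Chars.findFrom html pvMarker (start : Int) < 0 := by
      by_contra hnf
      have := pvFindFrom_pos_spec html pvMarker start (by omega)
      omega
    conv_lhs => rw [pvLoopA]
    conv_rhs => rw [pvLoopA]
    rw [dif_pos hf, dif_pos hf]
    simp [pvJoin_nil]
  | succ n ihf =>
    intro start acc h
    by_cases hf : PySem.Chars.findFrom html pvMarker (start : Int) < 0
    · conv_lhs => rw [pvLoopA]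
      conv_rhs => rw [pvLoopA]
      rw [dif_pos hf, dif_pos hf]
      simp [pvJoin_nil]
    · conv_lhs => rw [pvLoopA]
      conv_rhs => rw [pvLoopA]
      rw [dif_neg hf, dif_neg hf]
      by_cases he : 0 ≤ PySem.Chars.findFrom html ['"']
          (((PySem.Chars.findFrom html pvMarker (start : Int)).toNat : Int) + 7)
      · rw [dif_pos he, dif_pos he]
        dsimp only
        have hgt := pvPathEnd_gt html start hf
        rw [ihf _ _ (by omega), ihf _ ([] ++ _) (by omega)]
        simp
      · rw [dif_neg he, dif_neg he]
        simp [pvJoin_nil]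


-- first-occurrence characterisation of find
theorem pvFind_eq_of (s sub : List Char) (n : Nat) (h1 : sub <+: s.drop n)
    (h2 : ∀ i < n, ¬ sub <+: s.drop i) : PySem.Chars.find s sub = (n : Int) := by
  have h0 : 0 ≤ PySem.Chars.find s sub := by
    rw [PySem.Chars.find_nonneg_iff]
    exact (h1.isInfix).trans (List.drop_suffix n s).isInfix
  obtain ⟨hp, hmin⟩ := PySem.Chars.find_spec h0
  rcases Nat.lt_trichotomy (PySem.Chars.find s sub).toNat n with h | h | h
  · exact absurd hp (h2 _ h)
  · omega
  · exact absurd h1 (hmin n h)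

def pvSplitAux (s : List Char) : List (List Char) :=
  let f := PySem.Chars.find s pvMarker
  if h : 0 ≤ f then s.take f.toNat :: pvSplitAux (s.drop (f.toNat + 7)) else [s]
termination_by s.length
decreasing_by
  have hsp := (PySem.Chars.find_spec (s := s) (sub := pvMarker) h).1.length_le
  rw [List.length_drop] at hsp
  have h7 : pvMarker.length = 7 := rfl
  rw [h7] at hsp
  simp only [List.length_drop]
  omega

theorem pvSplitAux_ne_nil (s : List Char) : pvSplitAux s ≠ [] := by
  rw [pvSplitAux]
  split <;> simp

def pvSplitPre (pre l : List Char) : List (List Char) :=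
  match pvSplitAux l with
  | [] => [pre]
  | h :: t => (pre ++ h) :: t

def pvB (base : List (List Char)) (t : List Char) : List Char :=
  match pvSplitAux t with
  | [] => []
  | first :: rest => first ++ (rest.map (pvPartB base)).flatten

theorem pvSplitPre_nil (l : List Char) : pvSplitPre [] l = pvSplitAux l := by
  unfold pvSplitPre
  rcases h : pvSplitAux l with _ | ⟨x, xs⟩
  · exact absurd h (pvSplitAux_ne_nil l)
  · simp

theorem pvSplitAux_nil : pvSplitAux [] = [[]] := by
  have hf : PySem.Chars.find [] pvMarker = -1 := by
    rw [PySem.Chars.find_eq_neg_one_iff]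
    intro hinf
    have := hinf.length_le
    simp [pvMarker] at this
  rw [pvSplitAux, dif_neg (by rw [hf]; omega)]

theorem pvSplitAux_pos (l : List Char) (j : Nat)
    (hj : PySem.Chars.find l pvMarker = (j : Int)) :
    pvSplitAux l = l.take j :: pvSplitAux (l.drop (j + 7)) := by
  rw [pvSplitAux, dif_pos (by rw [hj]; omega)]
  rw [hj]
  simp [Int.toNat_natCast]

theorem pvSplitAux_neg (l : List Char) (hj : PySem.Chars.find l pvMarker = -1) :
    pvSplitAux l = [l] := by
  rw [pvSplitAux, dif_neg (by rw [hj]; omega)]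

theorem pvSplitPre_cons (pre : List Char) (c : Char) (rest : List Char)
    (h : ¬ pvMarker <+: (c :: rest)) :
    pvSplitPre pre (c :: rest) = pvSplitPre (pre ++ [c]) rest := by
  by_cases hg : PySem.Chars.find rest pvMarker = -1
  · have hcr : PySem.Chars.find (c :: rest) pvMarker = -1 := by
      rw [PySem.Chars.find_eq_neg_one_iff] at hg ⊢
      intro hinf
      rcases List.infix_cons_iff.mp hinf with h1 | h1
      · exact h h1
      · exact hg h1
    unfold pvSplitPre
    rw [pvSplitAux_neg _ hcr, pvSplitAux_neg _ hg]
    simp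
  · have hg0 : 0 ≤ PySem.Chars.find rest pvMarker := by
      have := PySem.Chars.neg_one_le_find rest pvMarker
      omega
    obtain ⟨g, hgg⟩ : ∃ g : Nat, PySem.Chars.find rest pvMarker = (g : Int) :=
      ⟨(PySem.Chars.find rest pvMarker).toNat, by omega⟩
    obtain ⟨hp, hmin⟩ := PySem.Chars.find_spec hg0
    rw [hgg, Int.toNat_natCast] at hp hmin
    have hcr : PySem.Chars.find (c :: rest) pvMarker = ((g + 1 : Nat) : Int) := by
      apply pvFind_eq_of
      · simpa using hp
      · intro i hi
        cases i with
        | zero => exact h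
        | succ k =>
          have hk : k < g := by omega
          simpa using hmin k hk
    unfold pvSplitPre
    rw [pvSplitAux_pos _ _ hcr, pvSplitAux_pos _ _ hgg]
    have hdrop : (c :: rest).drop (g + 1 + 7) = rest.drop (g + 7) := by
      have : g + 1 + 7 = (g + 7) + 1 := by omega
      rw [this, List.drop_succ_cons]
    rw [hdrop]
    simp [List.take_succ_cons]

theorem pvSplitOnGo_eq : ∀ (fuel : Nat) (l cur : List Char) (acc : List (List Char)),
    l.length < fuel →
    PySem.Chars.splitOn.go pvMarker fuel l cur acc = acc.reverse ++ pvSplitPre cur.reverse l := by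
  intro fuel
  induction fuel with
  | zero => intro l cur acc h; omega
  | succ f' ih =>
  intro l cur acc hfuel
  cases l with
  | nil =>
    have hstep : PySem.Chars.splitOn.go pvMarker (f' + 1) [] cur acc = (cur.reverse :: acc).reverse := by
      conv => lhs; unfold PySem.Chars.splitOn.go
    rw [hstep]
    unfold pvSplitPre
    rw [pvSplitAux_nil]
    simp
  | cons c rest =>
    by_cases hpcr : pvMarker.isPrefixOf (c :: rest) = true
    · have hstep : PySem.Chars.splitOn.go pvMarker (f' + 1) (c :: rest) cur acc
          = PySem.Chars.splitOn.go pvMarker f' ((c :: rest).drop 7) [] (cur.reverse :: acc) := by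
        conv => lhs; unfold PySem.Chars.splitOn.go
        rw [if_pos hpcr]
        rfl
      have hpre : pvMarker <+: (c :: rest) := List.isPrefixOf_iff_prefix.mp hpcr
      have hlen7 : 7 ≤ (c :: rest).length := by
        have := hpre.length_le
        simpa [pvMarker] using this
      rw [hstep, ih ((c :: rest).drop 7) [] (cur.reverse :: acc) (by simp at hlen7 hfuel ⊢; omega)]
      have hf0 : PySem.Chars.find (c :: rest) pvMarker = ((0 : Nat) : Int) := by
        apply pvFind_eq_of
        · simpa using hpre
        · omega
      conv => rhs; unfold pvSplitPre
      rw [pvSplitAux_pos _ _ hf0]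
      simp only [List.reverse_nil, pvSplitPre_nil, List.reverse_cons, List.take_zero,
        List.append_nil, Nat.zero_add]
      rcases hsp : pvSplitAux ((c :: rest).drop 7) with _ | ⟨x, xs⟩
      · exact absurd hsp (pvSplitAux_ne_nil _)
      · simp
    · have hstep : PySem.Chars.splitOn.go pvMarker (f' + 1) (c :: rest) cur acc
          = PySem.Chars.splitOn.go pvMarker f' rest (c :: cur) acc := by
        conv => lhs; unfold PySem.Chars.splitOn.go
        rw [if_neg hpcr]
      rw [hstep, ih rest (c :: cur) acc (by simp at hfuel ⊢; omega)]
      rw [List.reverse_cons, pvSplitPre_cons _ _ _ (fun hx => hpcr (List.isPrefixOf_iff_prefix.mpr hx))]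

theorem pvSplitOn_eq_aux (s : List Char) : PySem.Chars.splitOn s pvMarker = pvSplitAux s := by
  unfold PySem.Chars.splitOn
  rw [pvSplitOnGo_eq (s.length + 1) s [] [] (by omega)]
  simp [pvSplitPre_nil]

-- one-step equations for rfind.go
theorem pvRGo_zero (l sub : List Char) :
    PySem.Chars.rfind.go l sub 0 = if sub.isPrefixOf l = true then 0 else -1 := by
  conv => lhs; unfold PySem.Chars.rfind.go

theorem pvRGo_succ (l sub : List Char) (j : Nat) :
    PySem.Chars.rfind.go l sub (j + 1) =
      if sub.isPrefixOf (l.drop (j + 1)) = true then ((j + 1 : Nat) : Int)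
      else PySem.Chars.rfind.go l sub j := by
  conv => lhs; unfold PySem.Chars.rfind.go

-- rfind: result bounds and prefix witness
theorem pvRGo_spec (l sub : List Char) : ∀ k, 0 ≤ PySem.Chars.rfind.go l sub k →
    sub <+: l.drop (PySem.Chars.rfind.go l sub k).toNat ∧ PySem.Chars.rfind.go l sub k ≤ (k : Int) := by
  intro k
  induction k with
  | zero =>
    rw [pvRGo_zero]
    split
    · intro _
      refine ⟨?_, by omega⟩
      simpa using List.isPrefixOf_iff_prefix.mp (by assumption)
    · intro h; omega
  | succ j ih =>
    rw [pvRGo_succ]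
    split
    · intro _
      refine ⟨?_, by omega⟩
      rw [Int.toNat_natCast]
      exact List.isPrefixOf_iff_prefix.mp (by assumption)
    · intro h
      obtain ⟨h1, h2⟩ := ih h
      exact ⟨h1, by omega⟩

theorem pvRfind_ge (l sub : List Char) : -1 ≤ PySem.Chars.rfind l sub := by
  unfold PySem.Chars.rfind
  exact pvRfind_go_ge l sub l.length

theorem pvRfind_spec (l sub : List Char) (h : 0 ≤ PySem.Chars.rfind l sub) :
    sub <+: l.drop (PySem.Chars.rfind l sub).toNat ∧ PySem.Chars.rfind l sub ≤ (l.length : Int) := by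
  unfold PySem.Chars.rfind at h ⊢
  exact pvRGo_spec l sub l.length h

-- a single char not occurring in m is not found below m.length in m ++ X
theorem pvRGoDead (m X : List Char) (c : Char) (hc : c ∉ m) :
    ∀ j, j < m.length → PySem.Chars.rfind.go (m ++ X) [c] j = -1 := by
  intro j
  induction j with
  | zero =>
    intro hj
    obtain ⟨y, m', rfl⟩ : ∃ y m', m = y :: m' := by
      cases m with
      | nil => simp at hj
      | cons y m' => exact ⟨y, m', rfl⟩
    rw [pvRGo_zero, if_neg]
    simp only [List.cons_append, List.isPrefixOf, Bool.and_eq_true, beq_iff_eq]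
    intro hcy
    exact hc (by simp [hcy.1])
  | succ j ih =>
    intro hj
    rw [pvRGo_succ, if_neg, ih (by omega)]
    have hd : (m ++ X).drop (j + 1) = m.drop (j + 1) ++ X :=
      List.drop_append_of_le_length (by omega)
    rw [hd]
    obtain ⟨y, m', hy⟩ : ∃ y m', m.drop (j + 1) = y :: m' := by
      rcases hm : m.drop (j + 1) with _ | ⟨y, m'⟩
      · have := congrArg List.length hm; simp at this; omega
      · exact ⟨y, m', rfl⟩
    have hym : y ∈ m := List.mem_of_mem_drop (by rw [hy]; exact List.mem_cons_self ..)
    rw [hy]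
    simp only [List.cons_append, List.isPrefixOf, Bool.and_eq_true, beq_iff_eq]
    intro hcy
    exact hc (hcy.1 ▸ hym)

theorem pvRGoShift (m X : List Char) (c : Char) (hc : c ∉ m) :
    ∀ k, PySem.Chars.rfind.go (m ++ X) [c] (m.length + k) =
      (if PySem.Chars.rfind.go X [c] k = -1 then -1
       else (m.length : Int) + PySem.Chars.rfind.go X [c] k) := by
  intro k
  induction k with
  | zero =>
    rcases hm : m with _ | ⟨y, m'⟩
    · simp only [List.nil_append, List.length_nil, Nat.add_zero]
      have := pvRfind_go_ge X [c] 0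
      split <;> omega
    · rw [← hm]
      have hml : m.length = (m.length - 1) + 1 := by rw [hm]; simp
      rw [Nat.add_zero, hml, pvRGo_succ]
      have hd : (m ++ X).drop (m.length - 1 + 1) = X := by
        rw [← hml]; exact List.drop_left
      rw [hd, pvRGo_zero]
      by_cases hp : [c].isPrefixOf X = true
      · rw [if_pos hp, if_pos hp, if_neg (by omega)]
        omega
      · rw [if_neg hp, if_neg hp, if_pos rfl]
        exact pvRGoDead m X c hc (m.length - 1) (by omega)
  | succ k ih =>
    have harith : m.length + (k + 1) = (m.length + k) + 1 := by omega
    rw [harith, pvRGo_succ, pvRGo_succ]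
    have hd : (m ++ X).drop (m.length + k + 1) = X.drop (k + 1) := by
      rw [show m.length + k + 1 = m.length + (k + 1) by omega]
      rw [List.drop_append]
      simp
    rw [hd]
    by_cases hp : [c].isPrefixOf (X.drop (k + 1)) = true
    · rw [if_pos hp, if_pos hp, if_neg (by omega)]
      push_cast
      omega
    · rw [if_neg hp, if_neg hp]
      exact ih

theorem pvRfind_append (m X : List Char) (c : Char) (hc : c ∉ m) :
    PySem.Chars.rfind (m ++ X) [c] =
      (if PySem.Chars.rfind X [c] = -1 then -1
       else (m.length : Int) + PySem.Chars.rfind X [c]) := by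
  unfold PySem.Chars.rfind
  rw [List.length_append]
  exact pvRGoShift m X c hc X.length

-- rfindFrom with in-range Nat bounds = rfind on the slice
theorem pvRfindFrom_natCast (s sub : List Char) (a e : Nat) (hae : a ≤ e) (hel : e ≤ s.length) :
    PySem.Chars.rfindFrom s sub (a : Int) (some (e : Int)) =
      (if PySem.Chars.rfind ((s.take e).drop a) sub = -1 then -1
       else (a : Int) + PySem.Chars.rfind ((s.take e).drop a) sub) := by
  unfold PySem.Chars.rfindFrom
  have h1 : ¬ ((s.length : Int) < (e : Int)) := by omega
  have h2 : ¬ ((e : Int) < 0) := by omega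
  have h3 : ¬ ((a : Int) < 0) := by omega
  have h4 : ¬ ((e : Int) < (a : Int)) := by omega
  simp only [h1, h2, h3, h4, if_false, Int.toNat_natCast]

-- find of the marker survives dropping r ≤ (first occurrence)
theorem pvFind_marker_drop_pos (u : List Char) (r j2 : Nat) (hr : r ≤ j2)
    (hj : PySem.Chars.find u pvMarker = (j2 : Int)) :
    PySem.Chars.find (u.drop r) pvMarker = ((j2 - r : Nat) : Int) := by
  obtain ⟨hp, hmin⟩ := PySem.Chars.find_spec (s := u) (sub := pvMarker) (by rw [hj]; omega)
  rw [hj, Int.toNat_natCast] at hp hmin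
  apply pvFind_eq_of
  · rw [List.drop_drop]
    rw [show r + (j2 - r) = j2 by omega]
    exact hp
  · intro i hi
    rw [List.drop_drop]
    exact hmin (r + i) (by omega)

theorem pvFind_marker_drop_neg (u : List Char) (r : Nat)
    (hj : PySem.Chars.find u pvMarker = -1) :
    PySem.Chars.find (u.drop r) pvMarker = -1 := by
  rw [PySem.Chars.find_eq_neg_one_iff] at hj ⊢
  intro hinf
  exact hj (hinf.trans (List.drop_suffix r u).isInfix)

-- evaluation of B's per-part rewrite, given the quote decomposition of u
theorem pvPartB_eval (base : List (List Char)) (a t2 u part : List Char)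
    (hqa : ('"' : Char) ∉ a) (hua : u = a ++ '"' :: t2)
    (hpart : part = u ∨ ∃ j2 : Nat, part = u.take j2 ∧ a.length ≤ j2 ∧ j2 ≤ u.length) :
    pvPartB base part =
      '"' :: ((List.replicate (base.length - pvCommonLen base (List.splitOn '/' (a.take ((PySem.Chars.rfind a ['/'] + 1).toNat)))) ['.', '.', '/']).flatten ++
        ['/'].intercalate ((List.splitOn '/' (a.take ((PySem.Chars.rfind a ['/'] + 1).toNat))).drop
          (pvCommonLen base (List.splitOn '/' (a.take ((PySem.Chars.rfind a ['/'] + 1).toNat))))) ++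
        part.drop ((PySem.Chars.rfind a ['/'] + 1).toNat)) := by
  have hfuq : PySem.Chars.find u ['"'] = (a.length : Int) := by
    rw [hua]; exact pvFind_first '"' a t2 hqa
  have htakea : part.take a.length = a := by
    rcases hpart with rfl | ⟨j2, rfl, hj2a, hj2u⟩
    · rw [hua]
      exact List.take_left
    · rw [List.take_take, Nat.min_eq_left hj2a, hua]
      exact List.take_left
  have hlenp : a.length ≤ part.length := by
    have := congrArg List.length htakea
    simp at this
    omega
  have hE : (if PySem.Chars.find part ['"'] < 0 then (part.length : Int)
      else PySem.Chars.find part ['"']) = (a.length : Int) := by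
    rcases hpart with rfl | ⟨j2, rfl, hj2a, hj2u⟩
    · rw [hfuq, if_neg (by omega)]
    · rcases Nat.lt_or_ge a.length j2 with hlt | hge
      · have hf : PySem.Chars.find (u.take j2) ['"'] = (a.length : Int) := by
          rw [hua, List.take_append]
          rw [List.take_of_length_le (by omega)]
          obtain ⟨k, hk⟩ : ∃ k, j2 - a.length = k + 1 := ⟨j2 - a.length - 1, by omega⟩
          rw [hk, List.take_succ_cons]
          exact pvFind_first '"' a _ hqa
        rw [hf, if_neg (by omega)]
      · have hj2 : j2 = a.length := by omega
        have hpa : u.take j2 = a := by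
          rw [hj2, hua]
          exact List.take_left
        rw [hpa, pvFind_not_mem '"' a hqa, if_pos (by omega)]
  have hslash : PySem.Chars.rfindFrom part ['/'] 0 (some (a.length : Int))
      = PySem.Chars.rfind a ['/'] := by
    have hb := pvRfindFrom_natCast part ['/'] 0 a.length (by omega) hlenp
    rw [List.drop_zero, htakea] at hb
    have h0 : ((0 : Nat) : Int) = (0 : Int) := rfl
    rw [h0] at hb
    rw [hb]
    have := pvRfind_ge a ['/']
    split <;> omega
  show (let e0 := PySem.Chars.find part ['"'];
    let e : Int := if e0 < 0 then (part.length : Int) else e0;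
    let slash := PySem.Chars.rfindFrom part ['/'] 0 (some e);
    let segs := List.splitOn '/' (part.take (slash + 1).toNat);
    let i := pvCommonLen base segs;
    '"' :: ((List.replicate (base.length - i) ['.', '.', '/']).flatten ++
      ['/'].intercalate (segs.drop i) ++ part.drop (slash + 1).toNat)) = _
  simp only []
  rw [hE, hslash]
  have htk : part.take (PySem.Chars.rfind a ['/'] + 1).toNat
      = a.take (PySem.Chars.rfind a ['/'] + 1).toNat := by
    have hle : (PySem.Chars.rfind a ['/'] + 1).toNat ≤ a.length := by
      have hge := pvRfind_ge a ['/']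
      rcases Int.lt_or_le (PySem.Chars.rfind a ['/']) 0 with hlt | hpos
      · omega
      · have := (pvRfind_spec a ['/'] hpos).1
        have hlen := this.length_le
        simp at hlen
        have : (PySem.Chars.rfind a ['/']).toNat < a.length := by omega
        omega
    calc part.take (PySem.Chars.rfind a ['/'] + 1).toNat
        = (part.take a.length).take (PySem.Chars.rfind a ['/'] + 1).toNat := by
          rw [List.take_take, Nat.min_eq_left hle]
      _ = a.take (PySem.Chars.rfind a ['/'] + 1).toNat := by rw [htakea]
  rw [htk]

-- one marker step, with r = pathEnd - (fix+7) already identified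
theorem pvStepB (baseId' : List Char) (base : List (List Char)) (html : List Char)
    (n start j r : Nat) (a t2 u' : List Char)
    (hrep : baseId' = pvRep base) (hfree : ∀ s ∈ base, ('/' : Char) ∉ s)
    (ihf : ∀ start', start' ≤ html.length → html.length + 1 - start' ≤ n →
      pvLoopA baseId' html [] start' = pvB base (html.drop start'))
    (hu' : pvMarker ++ u' = html.drop (start + j))
    (hu : html.drop (start + j + 7) = u')
    (hua : u' = a ++ '"' :: t2) (hqa : ('"' : Char) ∉ a)
    (hjfind : PySem.Chars.find (html.drop start) pvMarker = (j : Int))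
    (hlen : html.length = start + j + 7 + u'.length)
    (hfu : html.length + 1 - start ≤ n + 1)
    (hr : r = (PySem.Chars.rfind a ['/'] + 1).toNat)
    (hra : r ≤ a.length) :
    pvLoopA baseId' html
      ([] ++ [PySem.Chars.slice html (some (start : Int)) (some (((start + j : Nat) : Int) + 1)),
        pvLoop2A baseId'
          (pvLoop1A baseId' 0 (PySem.Chars.slice html (some (((start + j : Nat) : Int) + 7))
            (some ((start + j + 7 + r : Nat) : Int)))).1
          (pvLoop1A baseId' 0 (PySem.Chars.slice html (some (((start + j : Nat) : Int) + 7))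
            (some ((start + j + 7 + r : Nat) : Int)))).2])
      (start + j + 7 + r)
    = pvB base (html.drop start) := by
  have hulen : u'.length = a.length + 1 + t2.length := by rw [hua]; simp; omega
  -- the extracted path is a.take r
  have hP : PySem.Chars.slice html (some (((start + j : Nat) : Int) + 7))
      (some ((start + j + 7 + r : Nat) : Int)) = a.take r := by
    rw [PySem.Chars.slice_eq_listSlice]
    rw [show (((start + j : Nat) : Int) + 7) = ((start + j + 7 : Nat) : Int) by push_cast; omega]
    rw [show ((start + j + 7 + r : Nat) : Int) = ((start + j + 7 : Nat) : Int) + ((r : Nat) : Int) by push_cast; omega]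
    rw [PySem.List.slice_natCast_add]
    rw [hu, hua]
    exact List.take_append_of_le_length hra
  -- the copied head chunk
  have hHead : PySem.Chars.slice html (some (start : Int)) (some (((start + j : Nat) : Int) + 1))
      = (html.drop start).take j ++ ['"'] := by
    rw [PySem.Chars.slice_eq_listSlice]
    rw [show (((start + j : Nat) : Int) + 1) = ((start : Nat) : Int) + ((j + 1 : Nat) : Int) by push_cast; omega]
    rw [PySem.List.slice_natCast_add]
    rw [List.take_add]
    congr 1
    have hdj : (html.drop start).drop j = pvMarker ++ u' := by
      rw [List.drop_drop]
      exact hu'.symm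
    rw [hdj]
    rfl
  -- the rewritten path
  have hInner : pvLoop2A baseId' (pvLoop1A baseId' 0 (a.take r)).1 (pvLoop1A baseId' 0 (a.take r)).2
      = pvPad (base.length - pvCommonLen base (List.splitOn '/' (a.take r))) ++
        ['/'].intercalate ((List.splitOn '/' (a.take r)).drop (pvCommonLen base (List.splitOn '/' (a.take r)))) :=
    pvInner_eq base baseId' 0 (a.take r) (Nat.zero_le _) (by rw [List.drop_zero, hrep]) hfree
  -- pull the accumulator out and use the induction hypothesis
  have hacc := pvLoopA_acc baseId' html n (start + j + 7 + r)
    ([] ++ [PySem.Chars.slice html (some (start : Int)) (some (((start + j : Nat) : Int) + 1)),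
      pvLoop2A baseId'
        (pvLoop1A baseId' 0 (PySem.Chars.slice html (some (((start + j : Nat) : Int) + 7))
          (some ((start + j + 7 + r : Nat) : Int)))).1
        (pvLoop1A baseId' 0 (PySem.Chars.slice html (some (((start + j : Nat) : Int) + 7))
          (some ((start + j + 7 + r : Nat) : Int)))).2]) (by omega)
  rw [hacc, ihf (start + j + 7 + r) (by omega) (by omega)]
  have hdropPE : html.drop (start + j + 7 + r) = u'.drop r := by
    rw [← hu, List.drop_drop]
  rw [hdropPE, hP, hHead, hInner]
  -- decompose the B side
  have hsplitT : pvSplitAux (html.drop start)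
      = (html.drop start).take j :: pvSplitAux u' := by
    rw [pvSplitAux_pos _ _ hjfind, List.drop_drop,
      show start + (j + 7) = start + j + 7 by omega, ← hu]
  by_cases hm2 : PySem.Chars.find u' pvMarker = -1
  · -- no further marker: u' is the final part
    have hpartEv := pvPartB_eval base a t2 u' u' hqa hua (Or.inl rfl)
    rw [← hr] at hpartEv
    have hBt : pvB base (html.drop start)
        = (html.drop start).take j ++ pvPartB base u' := by
      unfold pvB
      rw [hsplitT, pvSplitAux_neg _ hm2]
      simp
    have hBr : pvB base (u'.drop r) = u'.drop r := by
      unfold pvB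
      rw [pvSplitAux_neg _ (pvFind_marker_drop_neg u' r hm2)]
      simp
    rw [hBt, hBr, hpartEv]
    simp [pvPad]
  · -- another marker inside u'
    have hm20 : 0 ≤ PySem.Chars.find u' pvMarker := by
      have := PySem.Chars.neg_one_le_find u' pvMarker
      omega
    obtain ⟨j2, hj2⟩ : ∃ j2 : Nat, PySem.Chars.find u' pvMarker = (j2 : Int) :=
      ⟨(PySem.Chars.find u' pvMarker).toNat, by omega⟩
    obtain ⟨hp2, hmin2⟩ := PySem.Chars.find_spec hm20
    rw [hj2, Int.toNat_natCast] at hp2 hmin2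
    have hj2len : j2 + 7 ≤ u'.length := by
      have := hp2.length_le
      simp [pvMarker] at this
      omega
    have haj2 : a.length ≤ j2 := by
      by_contra hlt
      obtain ⟨w, hw⟩ := hp2
      have hdj2 : u'.drop j2 = a.drop j2 ++ '"' :: t2 := by
        rw [hua]
        exact List.drop_append_of_le_length (by omega)
      have hcons : a.drop j2 = a[j2] :: a.drop (j2 + 1) :=
        (List.getElem_cons_drop (by omega)).symm
      rw [hdj2, hcons] at hw
      have hw2 : ('"' : Char) :: (['\r', 'l', 'L', 'I', 'N', 'K'] ++ w)
          = a[j2] :: (a.drop (j2 + 1) ++ '"' :: t2) := hw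
      injection hw2 with h0 _
      exact hqa (h0 ▸ a.getElem_mem (by omega))
    have hpartEv := pvPartB_eval base a t2 u' (u'.take j2) hqa hua
      (Or.inr ⟨j2, rfl, haj2, by omega⟩)
    rw [← hr] at hpartEv
    have hBt : pvB base (html.drop start)
        = (html.drop start).take j ++ (pvPartB base (u'.take j2) ++
            ((pvSplitAux (u'.drop (j2 + 7))).map (pvPartB base)).flatten) := by
      unfold pvB
      rw [hsplitT, pvSplitAux_pos _ _ hj2]
      simp
    have hBr : pvB base (u'.drop r) = (u'.take j2).drop r ++
        ((pvSplitAux (u'.drop (j2 + 7))).map (pvPartB base)).flatten := by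
      unfold pvB
      rw [pvSplitAux_pos _ _ (pvFind_marker_drop_pos u' r j2 (by omega) hj2)]
      rw [show (u'.drop r).drop (j2 - r + 7) = u'.drop (j2 + 7) by
        rw [List.drop_drop]; congr 1; omega]
      rw [show (u'.drop r).take (j2 - r) = (u'.take j2).drop r by
        rw [List.drop_take]]
    rw [hBt, hBr, hpartEv]
    simp [pvPad]

theorem pvMainB (baseId' : List Char) (base : List (List Char))
    (hrep : baseId' = pvRep base) (hfree : ∀ s ∈ base, ('/' : Char) ∉ s)
    (html : List Char)
    (hpre : ∀ k < html.length, pvMarker <+: html.drop k → ('"' : Char) ∈ html.drop (k + 7)) :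
    ∀ (fuel start : Nat), start ≤ html.length → html.length + 1 - start ≤ fuel →
    pvLoopA baseId' html [] start = pvB base (html.drop start) := by
  intro fuel
  induction fuel with
  | zero => intro start h1 h2; omega
  | succ n ihf =>
    intro start hs hfu
    have hnat := PySem.Chars.findFrom_natCast html pvMarker start hs
    by_cases hf : PySem.Chars.findFrom html pvMarker (start : Int) < 0
    · rw [pvLoopA, dif_pos hf]
      have hft : PySem.Chars.find (html.drop start) pvMarker = -1 := by
        by_cases hx : PySem.Chars.find (html.drop start) pvMarker = -1
        · exact hx
        · exfalso
          rw [hnat, if_neg hx] at hf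
          have := PySem.Chars.neg_one_le_find (html.drop start) pvMarker
          omega
      unfold pvB
      rw [pvSplitAux_neg _ hft]
      rw [pvJoin_nil]
      rw [PySem.Chars.slice_eq_listSlice, PySem.List.slice_from html (by omega : (0:Int) ≤ (start : Int))]
      simp [Int.toNat_natCast]
    · have hftne : PySem.Chars.find (html.drop start) pvMarker ≠ -1 := by
        intro hx
        rw [hnat, if_pos hx] at hf
        omega
      obtain ⟨j, hjI⟩ : ∃ j : Nat, PySem.Chars.find (html.drop start) pvMarker = (j : Int) := by
        have := PySem.Chars.neg_one_le_find (html.drop start) pvMarker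
        exact ⟨(PySem.Chars.find (html.drop start) pvMarker).toNat, by omega⟩
      have hFrom : PySem.Chars.findFrom html pvMarker (start : Int) = ((start + j : Nat) : Int) := by
        rw [hnat, if_neg hftne, hjI]
        push_cast
        omega
      have hfixN : (PySem.Chars.findFrom html pvMarker (start : Int)).toNat = start + j := by
        rw [hFrom, Int.toNat_natCast]
      have hmk : pvMarker <+: html.drop (start + j) := by
        have := (PySem.Chars.find_spec (s := html.drop start) (sub := pvMarker) (by rw [hjI]; omega)).1
        rw [hjI, Int.toNat_natCast, List.drop_drop] at this
        exact this
      have hsj7 : start + j + 7 ≤ html.length := by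
        have := hmk.length_le
        simp [pvMarker] at this
        omega
      obtain ⟨u', hu'⟩ := hmk
      have hu : html.drop (start + j + 7) = u' := by
        have h7 := congrArg (List.drop 7) hu'
        rw [List.drop_drop] at h7
        rw [← h7]
        rw [show (7:Nat) = pvMarker.length from rfl]
        exact List.drop_left
      have hq : ('"' : Char) ∈ u' := by
        rw [← hu]
        exact hpre (start + j) (by omega) (hu' ▸ List.prefix_append pvMarker u')
      obtain ⟨a, t2, hua, hqa⟩ := pvFirst_decomp '"' u' hq
      have hulen : u'.length = a.length + 1 + t2.length := by rw [hua]; simp; omega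
      have hlenU : html.length = start + j + 7 + u'.length := by
        have := congrArg List.length hu
        simp [List.length_drop] at this
        omega
      have hfu2 : PySem.Chars.find u' ['"'] = (a.length : Int) := by
        rw [hua]; exact pvFind_first '"' a t2 hqa
      have hEndI : PySem.Chars.findFrom html ['"'] (((start + j : Nat) : Int) + 7)
          = ((start + j + 7 + a.length : Nat) : Int) := by
        rw [show (((start + j : Nat) : Int) + 7) = ((start + j + 7 : Nat) : Int) by push_cast; omega]
        rw [PySem.Chars.findFrom_natCast html ['"'] (start + j + 7) (by omega)]
        rw [hu, hfu2, if_neg (by omega)]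
        push_cast
        omega
      have hregion : (html.take (start + j + 7 + a.length)).drop (start + j) = pvMarker ++ a := by
        rw [List.drop_take]
        rw [show start + j + 7 + a.length - (start + j) = pvMarker.length + a.length by
          simp [pvMarker]
          omega]
        rw [← hu', List.take_append]
        rw [List.take_of_length_le (by omega), hua]
        congr 1
        rw [show pvMarker.length + a.length - pvMarker.length = a.length by omega]
        exact List.take_left
      have hpe := pvRfindFrom_natCast html ['/'] (start + j) (start + j + 7 + a.length)
        (by omega) (by omega)
      rw [hregion, pvRfind_append pvMarker a '/' (by decide)] at hpe
      -- unfold one step of A's loop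
      rw [pvLoopA, dif_neg hf]
      dsimp only
      rw [hfixN, hEndI]
      rw [dif_pos (by omega : (0:Int) ≤ ((start + j + 7 + a.length : Nat) : Int))]
      by_cases hv : PySem.Chars.rfind a ['/'] = -1
      · have hpe2 : PySem.Chars.rfindFrom html ['/'] ((start + j : Nat) : Int)
            (some ((start + j + 7 + a.length : Nat) : Int)) = -1 := by
          rw [hpe, hv]
          simp
        rw [hpe2]
        rw [if_neg (by omega)]
        have hstep := pvStepB baseId' base html n start j 0 a t2 u' hrep hfree ihf hu' hu hua hqa
          hjI hlenU hfu (by rw [hv]; rfl) (by omega)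
        exact hstep
      · have hv0 : 0 ≤ PySem.Chars.rfind a ['/'] := by
          have := pvRfind_ge a ['/']
          omega
        obtain ⟨v, hvv⟩ : ∃ v : Nat, PySem.Chars.rfind a ['/'] = (v : Int) :=
          ⟨(PySem.Chars.rfind a ['/']).toNat, by omega⟩
        have hvlt : v < a.length := by
          have hsp := (pvRfind_spec a ['/'] hv0).1
          have := hsp.length_le
          rw [hvv, Int.toNat_natCast] at this
          simp [List.length_drop] at this
          omega
        have hpe2 : PySem.Chars.rfindFrom html ['/'] ((start + j : Nat) : Int)
            (some ((start + j + 7 + a.length : Nat) : Int)) = ((start + j + 7 + v : Nat) : Int) := by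
          rw [hpe, if_neg hv, hvv]
          rw [if_neg (show ¬((pvMarker.length : Int) + (v : Int) = -1) by simp [pvMarker]; omega)]
          simp [pvMarker]
          push_cast
          omega
        rw [hpe2]
        rw [if_pos (by omega), Int.toNat_natCast]
        have hstep := pvStepB baseId' base html n start j (v + 1) a t2 u' hrep hfree ihf hu' hu hua hqa
          hjI hlenU hfu (by rw [hvv]; rw [show ((v:Int) + 1) = ((v + 1 : Nat) : Int) by push_cast; omega, Int.toNat_natCast]) (by omega)
        exact hstep

theorem pvAlt_eq (baseId html : String) :
    fixLinks_alt baseId html = String.ofList (pvB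
      (if baseId.toList = [] then [] else List.splitOn '/' baseId.toList) html.toList) := by
  unfold fixLinks_alt
  dsimp only
  rw [pvSplitOn_eq_aux]
  rcases h : pvSplitAux html.toList with _ | ⟨first, rest⟩
  · exact absurd h (pvSplitAux_ne_nil _)
  · unfold pvB
    rw [h]
    dsimp only
    rw [pvJoin_nil]
    simp

theorem fixLinks_spec' (baseId html : String)
    (hpre : ∀ k < html.toList.length, pvMarker <+: html.toList.drop k →
      ('"' : Char) ∈ html.toList.drop (k + 7)) :
    fixLinks baseId html = fixLinks_alt baseId html := by
  rw [pvAlt_eq]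
  unfold fixLinks
  dsimp only
  by_cases hb : baseId.toList = []
  · have hm := pvMainB ([] : List Char) [] rfl (by simp) html.toList hpre
      (html.toList.length + 1) 0 (Nat.zero_le _) (by omega)
    rw [List.drop_zero] at hm
    rw [hb]
    rw [if_neg (show ¬(([] : List Char) ≠ []) by simp), if_pos rfl, hm]
  · have hm := pvMainB (baseId.toList ++ ['/']) (List.splitOn '/' baseId.toList)
      (pvRep_splitOn baseId.toList) (pvSplitOn_seg_not_mem '/' baseId.toList) html.toList hpre
      (html.toList.length + 1) 0 (Nat.zero_le _) (by omega)
    rw [List.drop_zero] at hm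
    rw [if_pos hb, if_neg hb, hm]

-- ===== VERDICT (by name: the statement is the Claim_ definition above) =====
theorem fixLinks_spec : Claim_equal_fixLinks := by
  intro baseId html _hdom hpre
  show fixLinks baseId html = fixLinks_alt baseId html
  exact fixLinks_spec' baseId html hpre
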